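-- pv_equiv track=rewrite | github.com/jeongmincha/solving-algorithm | kakao-blind/kakao-2020-intership-test/kakao1.py | solution
-- ===== SOURCE A (Python) =====
-- def solution(numbers, hand):
--     assert hand == "left" or hand == "right"
--
--     # numbers 안에서 0만 11로 바꾸고 나머지는 그대로 둔다.
--     # #과 * 표시의 경우 12라고 설정하고, 0을 11이라고 설정한 후에 알고리즘 풀이를 시작하는 것이다.
--     nums = [(e+10) % 11 + 1 for e in numbers]
--     lp = 12
--     rp = 12
--     result = ""
--
--     for num in nums:
--         if num == 1 or num == 4 or num == 7:
--             result += "L"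
--         elif num == 3 or num == 6 or num == 9:
--             result += "R"
--         else:
--             # 현재 손가락 위치와 이동하고자 하는 손가락 위치 사이의 거리를 계산하는 로직
--             # 그 둘의 숫자 차이를 빼고, 3으로 나눈 몫과 나머지를 합하면 그 길이를 계산할 수 있다.
--             # ex.8과 5 사이에는 3의 차이가 있고, 3으로 나눈 몫과 나머지의 합은 1
--             # ex.8과 3 사이에는 5의 차이가 있고, 3으로 나눈 몫과 나머지의 합은 3
--             ld = abs(lp-num)
--             ld = int(ld / 3) + ld % 3
--             rd = abs(rp-num)
--             rd = int(rd / 3) + rd % 3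
--
--             if ld < rd:
--                 result += "L"
--             elif ld > rd:
--                 result += "R"
--             else:
--                 if hand == "left":
--                     result += "L"
--                 elif hand == "right":
--                     result += "R"
--
--         # 마지막으로 이동한 손가락에 따라서 해당 손가락의 위치를 업데이트 해줌.
--         last_p = result[-1]
--         if last_p == "L":
--             lp = num
--         elif last_p == "R":
--             rp = num
--
--     return result
-- ===== SOURCE B (Python) =====
-- # Table-driven reimplementation: all-pairs shortest-path distances on the keypad grid are
-- # precomputed by layered BFS, and the assignment loop only does table lookups (no distance
-- # arithmetic). Return value only; objective: alternative.
-- def solution(numbers, hand):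
--     assert hand in ("left", "right")
--     # keypad layout: key -> grid cell (digit d is key d, 0 is key 11)
--     pos = {1: (0, 0), 2: (0, 1), 3: (0, 2),
--            4: (1, 0), 5: (1, 1), 6: (1, 2),
--            7: (2, 0), 8: (2, 1), 9: (2, 2),
--            11: (3, 1)}
--     cells = set(pos.values()) | {(3, 0), (3, 2)}
--     # all-pairs distances by layered BFS on the grid graph (diameter 5)
--     dist = {}
--     for s in cells:
--         d = {s: 0}
--         frontier = [s]
--         for step in range(1, 6):
--             nxt = []
--             for (r, c) in frontier:
--                 for nb in ((r + 1, c), (r - 1, c), (r, c + 1), (r, c - 1)):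
--                     if nb in cells and nb not in d:
--                         d[nb] = step
--                         nxt.append(nb)
--             frontier = nxt
--         for t in cells:
--             dist[s, t] = d[t]
--     thumb = {"L": (3, 0), "R": (3, 2)}
--     tie = "L" if hand == "left" else "R"
--     sides = []
--     for e in numbers:
--         p = pos[(e + 10) % 11 + 1]   # KeyError on the '*' class (e % 11 == 10)
--         if p[1] == 0:
--             side = "L"
--         elif p[1] == 2:
--             side = "R"
--         else:
--             ld, rd = dist[thumb["L"], p], dist[thumb["R"], p]
--             side = "L" if ld < rd else ("R" if rd < ld else tie)
--         thumb[side] = p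
--         sides.append(side)
--     return "".join(sides)
-- ===== Notes on version B (the rewrite author's own statement) =====
-- stated objective: alternative
-- what changed: B precomputes an all-pairs shortest-path table for the keypad grid by layered BFS and the assignment loop is pure table lookups (position dict, distance dict, thumb dict), instead of A's per-step quotient/remainder distance arithmetic on raw key numbers with string concatenation and result[-1] read-back.
-- outside the precondition, e.g. on solution([10], 'right'): A returns 'R', B raises KeyError
import Mathlib
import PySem

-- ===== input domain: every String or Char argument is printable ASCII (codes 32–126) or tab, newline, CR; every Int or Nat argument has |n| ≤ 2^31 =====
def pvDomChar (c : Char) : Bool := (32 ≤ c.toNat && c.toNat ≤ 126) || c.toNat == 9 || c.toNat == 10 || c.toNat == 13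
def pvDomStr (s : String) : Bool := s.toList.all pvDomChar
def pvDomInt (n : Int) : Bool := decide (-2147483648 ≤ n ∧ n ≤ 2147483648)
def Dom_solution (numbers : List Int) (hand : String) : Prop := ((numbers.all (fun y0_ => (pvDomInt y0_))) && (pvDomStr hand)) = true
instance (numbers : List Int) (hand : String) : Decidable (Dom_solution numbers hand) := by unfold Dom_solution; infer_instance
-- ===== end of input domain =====

-- B precomputes an all-pairs shortest-path table for the keypad grid by layered BFS and the
-- assignment loop is pure table lookups, replacing A's per-step quotient/remainder distance
-- arithmetic (objective: alternative; equivalence on Pre_).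

-- ===== PORT A =====
-- loop body of A's for-loop, as a fold step over (lp, rp, result)
def stepA (hand : String) (st : Int × Int × List Char) (num : Int) : Int × Int × List Char :=
  let lp := st.1
  let rp := st.2.1
  let result := st.2.2
  let result :=
    if num = 1 ∨ num = 4 ∨ num = 7 then result ++ ['L']
    else if num = 3 ∨ num = 6 ∨ num = 9 then result ++ ['R']
    else
      let ld := |lp - num|
      -- int(ld / 3) on these ints is exactly truncating division: PySem.Int.truncdiv
      let ld := PySem.Int.truncdiv ld 3 + PySem.Int.mod ld 3
      let rd := |rp - num|
      let rd := PySem.Int.truncdiv rd 3 + PySem.Int.mod rd 3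
      if ld < rd then result ++ ['L']
      else if ld > rd then result ++ ['R']
      else if hand = "left" then result ++ ['L']
      else if hand = "right" then result ++ ['R']
      else result
  -- last_p = result[-1]; update the finger that moved
  match PySem.List.pyGet? result (-1) with
  | some 'L' => (num, rp, result)
  | some 'R' => (lp, num, result)
  | _ => (lp, rp, result)

def solution (numbers : List Int) (hand : String) : String :=
  let nums := numbers.map (fun e => PySem.Int.mod (e + 10) 11 + 1)
  let st := nums.foldl (stepA hand) (12, 12, ([] : List Char))
  String.ofList st.2.2

-- ===== PORT B =====
-- pos: keypad layout, key -> grid cell (digit d is key d, 0 is key 11)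
def keyPos : PySem.Dict Int (Int × Int) :=
  PySem.Dict.ofList [(1,(0,0)),(2,(0,1)),(3,(0,2)),(4,(1,0)),(5,(1,1)),(6,(1,2)),(7,(2,0)),(8,(2,1)),(9,(2,2)),(11,(3,1))]

-- cells = set(pos.values()) | {(3,0),(3,2)} (iterated only to build dicts looked up afterwards,
-- so Python's set iteration order cannot affect the result)
def keyCells : PySem.Set (Int × Int) :=
  PySem.Set.union (PySem.Set.ofList keyPos.values) (PySem.Set.ofList [((3:Int),(0:Int)),(3,2)])

-- layered BFS from s: d = {s: 0}; for step in range(1, 6): expand the frontier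
def bfsFrom (s : Int × Int) : PySem.Dict (Int × Int) Int :=
  let d : PySem.Dict (Int × Int) Int := PySem.Dict.ofList [(s, 0)]
  let st := (PySem.List.pyRange 1 6 1).foldl
    (fun (st : PySem.Dict (Int × Int) Int × List (Int × Int)) step =>
      st.2.foldl
        (fun (acc : PySem.Dict (Int × Int) Int × List (Int × Int)) p =>
          [(p.1 + 1, p.2), (p.1 - 1, p.2), (p.1, p.2 + 1), (p.1, p.2 - 1)].foldl
            (fun acc2 nb =>
              if PySem.Set.contains keyCells nb && !(acc2.1.contains nb)
              then (acc2.1.insert nb step, acc2.2 ++ [nb])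
              else acc2) acc)
        (st.1, ([] : List (Int × Int))))
    (d, [s])
  st.1

-- dist[s, t] = d[t]; BFS reaches every cell within 5 steps, so the lookup never misses
-- (getD's default is never read on keyCells)
def distTable : PySem.Dict ((Int × Int) × (Int × Int)) Int :=
  keyCells.foldl (fun dist s =>
    let d := bfsFrom s
    keyCells.foldl (fun dist t => dist.insert (s, t) (d.getD t 0)) dist)
    PySem.Dict.empty

-- loop body of B's for-loop; the thumb dict's 1-char string keys "L"/"R" are ported as Char
-- (exact on this domain); 'tie' is inlined (hand is fixed across the loop)
def stepB (hand : String) (st : PySem.Dict Char (Int × Int) × List Char) (e : Int) :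
    PySem.Dict Char (Int × Int) × List Char :=
  match keyPos.get? (PySem.Int.mod (e + 10) 11 + 1) with
  | none => st   -- Python raises KeyError here; excluded by Pre_solution
  | some p =>
    let side : Char :=
      if p.2 = 0 then 'L'
      else if p.2 = 2 then 'R'
      else
        let ld := distTable.getD (st.1.getD 'L' (0, 0), p) 0
        let rd := distTable.getD (st.1.getD 'R' (0, 0), p) 0
        if ld < rd then 'L' else if rd < ld then 'R'
        else if hand = "left" then 'L' else 'R'
    (st.1.insert side p, st.2 ++ [side])

def solution_alt (numbers : List Int) (hand : String) : String :=
  let st := numbers.foldl (stepB hand)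
    (PySem.Dict.ofList [('L', ((3:Int), (0:Int))), ('R', (3, 2))], ([] : List Char))
  String.ofList st.2

-- ===== PRECONDITION & SPEC =====
-- Pre_ excludes hands other than "left"/"right" (A's assert raises, so does B's) and lists with
-- an element e ≡ 10 (mod 11): A maps such an e to the phantom key 10 ('*', unreachable from the
-- keypad digits 0-9) and still returns, while B's pos lookup raises KeyError there.
def Pre_solution (numbers : List Int) (hand : String) : Prop :=
  (hand = "left" ∨ hand = "right") ∧ ∀ e ∈ numbers, PySem.Int.mod (e + 10) 11 ≠ 9
instance (numbers : List Int) (hand : String) : Decidable (Pre_solution numbers hand) := by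
  unfold Pre_solution; infer_instance

def pvWitness_solution : List Int × String := ([1, 0, 5, 2, 8], "right")

def Spec_solution (numbers : List Int) (hand : String) (out : String) : Prop := out = solution_alt numbers hand
instance (numbers : List Int) (hand : String) (out : String) : Decidable (Spec_solution numbers hand out) := by unfold Spec_solution; infer_instance

-- ===== CLAIM (what is proved, stated in full; the proofs are below) =====
def Claim_equal_solution : Prop := ∀ (numbers : List Int) (hand : String), Dom_solution numbers hand → Pre_solution numbers hand → Spec_solution numbers hand (solution numbers hand)

-- ===== LEMMAS AND PROOFS =====

-- the value of distTable, proved once so that decide-based lemmas need not re-run the BFS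
def distLit : PySem.Dict ((Int × Int) × (Int × Int)) Int :=
  PySem.Dict.mk [
    (((0,0),(0,0)),0),(((0,0),(0,1)),1),(((0,0),(0,2)),2),(((0,0),(1,0)),1),(((0,0),(1,1)),2),(((0,0),(1,2)),3),
    (((0,0),(2,0)),2),(((0,0),(2,1)),3),(((0,0),(2,2)),4),(((0,0),(3,1)),4),(((0,0),(3,0)),3),(((0,0),(3,2)),5),
    (((0,1),(0,0)),1),(((0,1),(0,1)),0),(((0,1),(0,2)),1),(((0,1),(1,0)),2),(((0,1),(1,1)),1),(((0,1),(1,2)),2),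
    (((0,1),(2,0)),3),(((0,1),(2,1)),2),(((0,1),(2,2)),3),(((0,1),(3,1)),3),(((0,1),(3,0)),4),(((0,1),(3,2)),4),
    (((0,2),(0,0)),2),(((0,2),(0,1)),1),(((0,2),(0,2)),0),(((0,2),(1,0)),3),(((0,2),(1,1)),2),(((0,2),(1,2)),1),
    (((0,2),(2,0)),4),(((0,2),(2,1)),3),(((0,2),(2,2)),2),(((0,2),(3,1)),4),(((0,2),(3,0)),5),(((0,2),(3,2)),3),
    (((1,0),(0,0)),1),(((1,0),(0,1)),2),(((1,0),(0,2)),3),(((1,0),(1,0)),0),(((1,0),(1,1)),1),(((1,0),(1,2)),2),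
    (((1,0),(2,0)),1),(((1,0),(2,1)),2),(((1,0),(2,2)),3),(((1,0),(3,1)),3),(((1,0),(3,0)),2),(((1,0),(3,2)),4),
    (((1,1),(0,0)),2),(((1,1),(0,1)),1),(((1,1),(0,2)),2),(((1,1),(1,0)),1),(((1,1),(1,1)),0),(((1,1),(1,2)),1),
    (((1,1),(2,0)),2),(((1,1),(2,1)),1),(((1,1),(2,2)),2),(((1,1),(3,1)),2),(((1,1),(3,0)),3),(((1,1),(3,2)),3),
    (((1,2),(0,0)),3),(((1,2),(0,1)),2),(((1,2),(0,2)),1),(((1,2),(1,0)),2),(((1,2),(1,1)),1),(((1,2),(1,2)),0),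
    (((1,2),(2,0)),3),(((1,2),(2,1)),2),(((1,2),(2,2)),1),(((1,2),(3,1)),3),(((1,2),(3,0)),4),(((1,2),(3,2)),2),
    (((2,0),(0,0)),2),(((2,0),(0,1)),3),(((2,0),(0,2)),4),(((2,0),(1,0)),1),(((2,0),(1,1)),2),(((2,0),(1,2)),3),
    (((2,0),(2,0)),0),(((2,0),(2,1)),1),(((2,0),(2,2)),2),(((2,0),(3,1)),2),(((2,0),(3,0)),1),(((2,0),(3,2)),3),
    (((2,1),(0,0)),3),(((2,1),(0,1)),2),(((2,1),(0,2)),3),(((2,1),(1,0)),2),(((2,1),(1,1)),1),(((2,1),(1,2)),2),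
    (((2,1),(2,0)),1),(((2,1),(2,1)),0),(((2,1),(2,2)),1),(((2,1),(3,1)),1),(((2,1),(3,0)),2),(((2,1),(3,2)),2),
    (((2,2),(0,0)),4),(((2,2),(0,1)),3),(((2,2),(0,2)),2),(((2,2),(1,0)),3),(((2,2),(1,1)),2),(((2,2),(1,2)),1),
    (((2,2),(2,0)),2),(((2,2),(2,1)),1),(((2,2),(2,2)),0),(((2,2),(3,1)),2),(((2,2),(3,0)),3),(((2,2),(3,2)),1),
    (((3,1),(0,0)),4),(((3,1),(0,1)),3),(((3,1),(0,2)),4),(((3,1),(1,0)),3),(((3,1),(1,1)),2),(((3,1),(1,2)),3),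
    (((3,1),(2,0)),2),(((3,1),(2,1)),1),(((3,1),(2,2)),2),(((3,1),(3,1)),0),(((3,1),(3,0)),1),(((3,1),(3,2)),1),
    (((3,0),(0,0)),3),(((3,0),(0,1)),4),(((3,0),(0,2)),5),(((3,0),(1,0)),2),(((3,0),(1,1)),3),(((3,0),(1,2)),4),
    (((3,0),(2,0)),1),(((3,0),(2,1)),2),(((3,0),(2,2)),3),(((3,0),(3,1)),1),(((3,0),(3,0)),0),(((3,0),(3,2)),2),
    (((3,2),(0,0)),5),(((3,2),(0,1)),4),(((3,2),(0,2)),3),(((3,2),(1,0)),4),(((3,2),(1,1)),3),(((3,2),(1,2)),2),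
    (((3,2),(2,0)),3),(((3,2),(2,1)),2),(((3,2),(2,2)),1),(((3,2),(3,1)),1),(((3,2),(3,0)),2),(((3,2),(3,2)),0)]

set_option maxRecDepth 100000 in
lemma distTable_eq : distTable = distLit := by decide

-- reachable (A finger value, B finger coordinate) pairs
def LRel : List (Int × Int × Int) :=
  [(12, 3, 0), (1, 0, 0), (2, 0, 1), (4, 1, 0), (5, 1, 1), (7, 2, 0), (8, 2, 1), (11, 3, 1)]
def RRel : List (Int × Int × Int) :=
  [(12, 3, 2), (2, 0, 1), (3, 0, 2), (5, 1, 1), (6, 1, 2), (8, 2, 1), (9, 2, 2), (11, 3, 1)]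
-- key values (e+10)%11+1 admitted by Pre_
def VKeys : List Int := [1, 2, 3, 4, 5, 6, 7, 8, 9, 11]

-- the data part of one A step: (new lp, new rp, appended char)
def coreA (hleft : Bool) (lp rp num : Int) : Int × Int × Char :=
  let ch :=
    if num = 1 ∨ num = 4 ∨ num = 7 then 'L'
    else if num = 3 ∨ num = 6 ∨ num = 9 then 'R'
    else
      let ld := |lp - num|
      let ld := PySem.Int.truncdiv ld 3 + PySem.Int.mod ld 3
      let rd := |rp - num|
      let rd := PySem.Int.truncdiv rd 3 + PySem.Int.mod rd 3
      if ld < rd then 'L' else if ld > rd then 'R' else if hleft then 'L' else 'R'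
  if ch = 'L' then (num, rp, 'L') else (lp, num, 'R')

-- the data part of one B step, over an explicit distance dict: (new left, new right, appended char)
def coreB (dt : PySem.Dict ((Int × Int) × (Int × Int)) Int) (hleft : Bool)
    (l r : Int × Int) (k : Int) : (Int × Int) × (Int × Int) × Char :=
  match keyPos.get? k with
  | none => (l, r, 'X')   -- never hit for k ∈ VKeys
  | some p =>
    let ch :=
      if p.2 = 0 then 'L'
      else if p.2 = 2 then 'R'
      else
        let ld := dt.getD (l, p) 0
        let rd := dt.getD (r, p) 0
        if ld < rd then 'L' else if rd < ld then 'R' else if hleft then 'L' else 'R'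
    if ch = 'L' then (p, r, 'L') else (l, p, 'R')

lemma stepA_core (hand : String) (hleft : Bool)
    (hh : hand = if hleft then "left" else "right")
    (lp rp num : Int) (acc : List Char) :
    stepA hand (lp, rp, acc) num =
      ((coreA hleft lp rp num).1, (coreA hleft lp rp num).2.1,
        acc ++ [(coreA hleft lp rp num).2.2]) := by
  subst hh
  cases hleft <;>
    simp only [stepA, coreA, Bool.false_eq_true, if_true, if_false, gt_iff_lt] <;>
    split_ifs <;>
    simp_all [PySem.List.pyGet?_neg_one_append_singleton]

lemma stepB_core (hand : String) (hleft : Bool)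
    (hh : hand = if hleft then "left" else "right")
    (l r : Int × Int) (acc : List Char) (e : Int) (p : Int × Int)
    (hp : keyPos.get? (PySem.Int.mod (e + 10) 11 + 1) = some p) :
    stepB hand (PySem.Dict.mk [('L', l), ('R', r)], acc) e =
      (PySem.Dict.mk
        [('L', (coreB distTable hleft l r (PySem.Int.mod (e + 10) 11 + 1)).1),
         ('R', (coreB distTable hleft l r (PySem.Int.mod (e + 10) 11 + 1)).2.1)],
        acc ++ [(coreB distTable hleft l r (PySem.Int.mod (e + 10) 11 + 1)).2.2]) := by
  subst hh
  cases hleft <;>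
    simp only [stepB, coreB, hp, Bool.false_eq_true, if_true, if_false] <;>
    split_ifs <;>
    simp_all [PySem.Dict.getD, PySem.Dict.get?, PySem.Dict.insert] <;> omega

lemma keyPos_isSome : ∀ k ∈ VKeys, (keyPos.get? k).isSome := by decide

-- one step preserves the simulation, for every reachable pair of states and admitted key
lemma core_sim : ∀ hleft : Bool, ∀ k ∈ VKeys, ∀ pl ∈ LRel, ∀ pr ∈ RRel,
    (coreA hleft pl.1 pr.1 k).2.2 = (coreB distLit hleft pl.2 pr.2 k).2.2 ∧
    ((coreA hleft pl.1 pr.1 k).1, (coreB distLit hleft pl.2 pr.2 k).1) ∈ LRel ∧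
    ((coreA hleft pl.1 pr.1 k).2.1, (coreB distLit hleft pl.2 pr.2 k).2.1) ∈ RRel := by
  decide

lemma num_mem_VKeys (e : Int) (he : PySem.Int.mod (e + 10) 11 ≠ 9) :
    PySem.Int.mod (e + 10) 11 + 1 ∈ VKeys := by
  have h1 := PySem.Int.mod_nonneg (e + 10) (b := 11) (by norm_num)
  have h2 := PySem.Int.mod_lt (e + 10) (b := 11) (by norm_num)
  simp only [VKeys, List.mem_cons]
  omega

lemma fold_sim (hand : String) (hleft : Bool)
    (hh : hand = if hleft then "left" else "right") :
    ∀ (ns : List Int), (∀ e ∈ ns, PySem.Int.mod (e + 10) 11 ≠ 9) →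
    ∀ (lp rp : Int) (l r : Int × Int) (acc : List Char),
      (lp, l) ∈ LRel → (rp, r) ∈ RRel →
      ((ns.map (fun e => PySem.Int.mod (e + 10) 11 + 1)).foldl (stepA hand) (lp, rp, acc)).2.2 =
      (ns.foldl (stepB hand) (PySem.Dict.mk [('L', l), ('R', r)], acc)).2 := by
  intro ns
  induction ns with
  | nil => intro _ lp rp l r acc _ _; rfl
  | cons e ns ih =>
    intro hgood lp rp l r acc hl hr
    have he : PySem.Int.mod (e + 10) 11 ≠ 9 := hgood e (by simp)
    have hmem := num_mem_VKeys e he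
    obtain ⟨p, hp⟩ := Option.isSome_iff_exists.mp (keyPos_isSome _ hmem)
    have hsim := core_sim hleft _ hmem (lp, l) hl (rp, r) hr
    obtain ⟨hch, hl', hr'⟩ := hsim
    simp only [List.map_cons, List.foldl_cons,
      stepA_core hand hleft hh, stepB_core hand hleft hh _ _ _ _ _ hp, distTable_eq]
    rw [hch]
    exact ih (fun x hx => hgood x (by simp [hx])) _ _ _ _ _ hl' hr'

-- ===== VERDICT (by name: the statement is the Claim_ definition above) =====
theorem solution_spec : Claim_equal_solution := by
  intro numbers hand _hdom hpre
  obtain ⟨hhand, hgood⟩ := hpre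
  unfold Spec_solution solution solution_alt
  have hleft : ∃ b : Bool, hand = if b then "left" else "right" := by
    rcases hhand with h | h
    · exact ⟨true, by simp [h]⟩
    · exact ⟨false, by simp [h]⟩
  obtain ⟨b, hb⟩ := hleft
  have hd : (PySem.Dict.ofList [('L', ((3:Int), (0:Int))), ('R', (3, 2))] :
      PySem.Dict Char (Int × Int)) = PySem.Dict.mk [('L', (3, 0)), ('R', (3, 2))] := by decide
  rw [hd]
  have := fold_sim hand b hb numbers hgood 12 12 (3, 0) (3, 2) []
    (by decide) (by decide)
  exact congrArg String.ofList this
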